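-- pv_equiv track=rewrite | github.com/westonbrown/open-trajectory-gym | src/trajgym/parsing/tool_calls.py | _scan_balanced_call
-- ===== SOURCE A (Python) =====
-- def _scan_balanced_call(text: str, open_idx: int) -> tuple[str, int] | None:
--     """Return ``(args_src, end_idx)`` for balanced ``(...)`` or ``None``."""
--     if open_idx < 0 or open_idx >= len(text) or text[open_idx] != "(":
--         return None
--     depth = 0
--     in_quote = ""
--     escaped = False
--     for idx in range(open_idx, len(text)):
--         ch = text[idx]
--         if in_quote:
--             if escaped:
--                 escaped = False
--             elif ch == "\\":
--                 escaped = True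
--             elif ch == in_quote:
--                 in_quote = ""
--             continue
--         if ch in {'"', "'"}:
--             in_quote = ch
--             continue
--         if ch == "(":
--             depth += 1
--             continue
--         if ch == ")":
--             depth -= 1
--             if depth == 0:
--                 return text[open_idx + 1 : idx], idx + 1
--     return None
-- ===== SOURCE B (Python) =====
-- def _scan_balanced_call(text: str, open_idx: int):
--     """Return ``(args_src, end_idx)`` for balanced ``(...)`` or ``None``."""
--     n = len(text)
--     if open_idx < 0 or open_idx >= n or text[open_idx] != "(":
--         return None
--     depth = 0
--     idx = open_idx
--     while idx < n:
--         ch = text[idx]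
--         if ch == "(":
--             depth += 1
--         elif ch == ")":
--             depth -= 1
--             if depth == 0:
--                 return text[open_idx + 1 : idx], idx + 1
--         elif ch == '"' or ch == "'":
--             # consume the quoted literal in an inner scan (skip a char after each backslash)
--             j = idx + 1
--             while True:
--                 if j >= n:
--                     return None  # unterminated quote: the call can never close
--                 cj = text[j]
--                 if cj == "\\":
--                     j += 2
--                 elif cj == ch:
--                     break
--                 else:
--                     j += 1
--             idx = j
--         idx += 1
--     return None
-- ===== Notes on version B (the rewrite author's own statement) =====
-- stated objective: alternative
-- what changed: Replaced A's single-pass state machine with persistent in_quote/escaped flags by an outer depth-only loop that, on meeting a quote, delegates to an inner scan consuming the whole quoted literal (skipping a character after each backslash) before resuming.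
import Mathlib
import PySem

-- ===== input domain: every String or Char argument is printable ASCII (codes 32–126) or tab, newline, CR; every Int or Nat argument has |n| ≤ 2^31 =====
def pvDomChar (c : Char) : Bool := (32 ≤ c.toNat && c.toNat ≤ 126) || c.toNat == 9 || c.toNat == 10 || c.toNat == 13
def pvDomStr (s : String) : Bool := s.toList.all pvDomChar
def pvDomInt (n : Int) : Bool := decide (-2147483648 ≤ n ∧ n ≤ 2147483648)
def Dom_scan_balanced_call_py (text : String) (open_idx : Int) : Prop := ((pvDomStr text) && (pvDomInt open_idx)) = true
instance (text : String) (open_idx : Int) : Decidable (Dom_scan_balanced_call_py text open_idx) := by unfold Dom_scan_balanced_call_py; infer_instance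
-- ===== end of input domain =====

-- B replaces A's persistent in_quote/escaped flags with one outer depth loop plus an
-- inner helper that consumes a quoted literal (objective: alternative decomposition).

-- ===== PORT A =====
-- A's for-loop over range(open_idx, len(text)) with state (depth, in_quote, escaped);
-- returns the index at which depth hits 0 (the slicing is done by the wrapper, as in A).
def scanA (cs : List Char) (idx : Nat) (depth : Int) (in_quote : Option Char)
    (escaped : Bool) : Option Nat :=
  match cs with
  | [] => none
  | ch :: rest =>
    match in_quote with
    | some q =>
      if escaped then scanA rest (idx + 1) depth (some q) false
      else if ch = '\\' then scanA rest (idx + 1) depth (some q) true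
      else if ch = q then scanA rest (idx + 1) depth none false
      else scanA rest (idx + 1) depth (some q) false
    | none =>
      if ch = '"' ∨ ch = '\'' then scanA rest (idx + 1) depth (some ch) false
      else if ch = '(' then scanA rest (idx + 1) (depth + 1) none false
      else if ch = ')' then
        if depth - 1 = 0 then some idx else scanA rest (idx + 1) (depth - 1) none false
      else scanA rest (idx + 1) depth none false

def scan_balanced_call_py (text : String) (open_idx : Int) : Option (String × Int) :=
  let cs := text.toList
  if open_idx < 0 ∨ open_idx ≥ (cs.length : Int) ∨ cs.getD open_idx.toNat ' ' ≠ '(' then none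
  else
    match scanA (cs.drop open_idx.toNat) open_idx.toNat 0 none false with
    | none => none
    | some idx => some (String.ofList (PySem.List.slice cs (some (open_idx + 1)) (some (idx : Int))),
                        (idx : Int) + 1)

-- ===== PORT B =====
-- B's inner while-loop: past an opening quote q, skip a char after each backslash until
-- the matching unescaped q; returns (rest after the closing quote, its index + 1).
def skipQuote (q : Char) : List Char → Nat → Option (List Char × Nat)
  | [], _ => none
  | c :: rest, j =>
    if c = '\\' then
      match rest with
      | [] => none
      | _ :: rest' => skipQuote q rest' (j + 2)
    else if c = q then some (rest, j + 1)
    else skipQuote q rest (j + 1)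

theorem skipQuote_len {q : Char} : ∀ (n : Nat) (cs : List Char), cs.length ≤ n →
    ∀ {j r j'}, skipQuote q cs j = some (r, j') → r.length ≤ cs.length := by
  intro n
  induction n with
  | zero =>
    intro cs hlen j r j' h
    have : cs = [] := List.eq_nil_of_length_eq_zero (Nat.le_zero.mp hlen)
    subst this; simp [skipQuote] at h
  | succ m ih =>
    intro cs hlen j r j' h
    match cs, hlen with
    | [], _ => simp [skipQuote] at h
    | c :: rest, hlen =>
      rw [skipQuote.eq_def] at h; dsimp only at h
      split_ifs at h with h1 h2
      · match rest, h with
        | [], h => simp at h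
        | c2 :: rest', h =>
          have hr' : rest'.length ≤ m := by simp at hlen; omega
          have := ih rest' hr' h
          simp at this ⊢; omega
      · simp at h
        simp [← h.1]
      · have hr : rest.length ≤ m := by simp at hlen; omega
        have := ih rest hr h
        simp; omega

-- B's outer while-loop: only a depth counter; quoted literals handled by skipQuote.
def scanB (cs : List Char) (idx : Nat) (depth : Int) : Option Nat :=
  match h : cs with
  | [] => none
  | c :: rest =>
    if c = '(' then scanB rest (idx + 1) (depth + 1)
    else if c = ')' then
      if depth - 1 = 0 then some idx else scanB rest (idx + 1) (depth - 1)
    else if c = '"' ∨ c = '\'' then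
      match _hs : skipQuote c rest (idx + 1) with
      | none => none
      | some (rest', j) => scanB rest' j depth
    else scanB rest (idx + 1) depth
termination_by cs.length
decreasing_by
  · simp
  · simp
  · have := skipQuote_len (q := c) (rest.length) rest le_rfl _hs; simp; omega
  · simp

def scan_balanced_call_py_alt (text : String) (open_idx : Int) : Option (String × Int) :=
  let cs := text.toList
  if open_idx < 0 ∨ open_idx ≥ (cs.length : Int) ∨ cs.getD open_idx.toNat ' ' ≠ '(' then none
  else
    match scanB (cs.drop open_idx.toNat) open_idx.toNat 0 with
    | none => none
    | some idx => some (String.ofList (PySem.List.slice cs (some (open_idx + 1)) (some (idx : Int))),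
                        (idx : Int) + 1)

-- ===== PRECONDITION & SPEC =====
def Spec_scan_balanced_call_py (text : String) (open_idx : Int) (out : Option (String × Int)) : Prop := out = scan_balanced_call_py_alt text open_idx
instance (text : String) (open_idx : Int) (out : Option (String × Int)) : Decidable (Spec_scan_balanced_call_py text open_idx out) := by unfold Spec_scan_balanced_call_py; infer_instance

-- ===== CLAIM (what is proved, stated in full; the proofs are below) =====
def Claim_equal_scan_balanced_call_py : Prop := ∀ (text : String) (open_idx : Int), Dom_scan_balanced_call_py text open_idx → Spec_scan_balanced_call_py text open_idx (scan_balanced_call_py text open_idx)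

-- ===== LEMMAS AND PROOFS =====

-- the two loops agree: scanA in non-quote mode is scanB; scanA in quote mode with
-- escaped=false is skipQuote followed by scanB
theorem scanA_eq_scanB : ∀ (n : Nat) (cs : List Char), cs.length ≤ n →
    (∀ idx depth, scanA cs idx depth none false = scanB cs idx depth) ∧
    (∀ q idx depth, scanA cs idx depth (some q) false =
      match skipQuote q cs idx with
      | none => none
      | some (rest', j) => scanB rest' j depth) := by
  intro n
  induction n with
  | zero =>
    intro cs hlen
    have : cs = [] := List.eq_nil_of_length_eq_zero (Nat.le_zero.mp hlen)
    subst this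
    constructor
    · intro idx depth; simp [scanA, scanB]
    · intro q idx depth; simp [scanA, skipQuote]
  | succ m ih =>
    intro cs hlen
    match cs with
    | [] =>
      constructor
      · intro idx depth; simp [scanA, scanB]
      · intro q idx depth; simp [scanA, skipQuote]
    | c :: rest =>
      have hr : rest.length ≤ m := by simp at hlen; omega
      constructor
      · intro idx depth
        rw [scanA, scanB]
        by_cases hq : c = '"' ∨ c = '\''
        · simp only [hq, if_true]
          have hnp : ¬ c = '(' := by rcases hq with h | h <;> simp [h]
          have hnc : ¬ c = ')' := by rcases hq with h | h <;> simp [h]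
          simp only [hnp, if_false, hnc]
          rw [(ih rest hr).2 c (idx + 1) depth]
          cases skipQuote c rest (idx + 1) with
          | none => simp
          | some p => simp
        · simp only [hq, if_false]
          by_cases hp : c = '('
          · simp only [hp, if_true]; exact (ih rest hr).1 (idx + 1) (depth + 1)
          · simp only [hp, if_false]
            by_cases hc : c = ')'
            · simp only [hc, if_true]
              by_cases hd : depth - 1 = 0
              · simp [hd]
              · simp only [hd, if_false]; exact (ih rest hr).1 (idx + 1) (depth - 1)
            · simp only [hc, if_false]; exact (ih rest hr).1 (idx + 1) depth
      · intro q idx depth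
        rw [scanA, skipQuote.eq_def]
        by_cases hb : c = '\\'
        · simp only [hb, if_true]
          match rest, hr with
          | [], _ => simp [scanA]
          | c2 :: rest', hr =>
            rw [scanA]
            simp only
            have hr' : rest'.length ≤ m := by have := hr; simp at this; omega
            have := (ih rest' hr').2 q (idx + 2) depth
            simpa [Nat.add_assoc] using this
        · simp only [hb, if_false]
          by_cases he : c = q
          · simp only [he, if_true]
            exact (ih rest hr).1 (idx + 1) depth
          · simp only [he, if_false]
            have := (ih rest hr).2 q (idx + 1) depth
            simpa using this

-- ===== VERDICT (by name: the statement is the Claim_ definition above) =====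
theorem scan_balanced_call_py_spec : Claim_equal_scan_balanced_call_py := by
  intro text open_idx _
  unfold Spec_scan_balanced_call_py scan_balanced_call_py scan_balanced_call_py_alt
  simp only
  split_ifs with h
  · rfl
  · rw [(scanA_eq_scanB (text.toList.drop open_idx.toNat).length _ le_rfl).1]
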